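-- pv_equiv track=rewrite | github.com/K0DA-PARALLAXStudio/TensorSort_Model_Installer-Comfyui | _Module/modul4_loras.py | is_lycoris
-- ===== SOURCE A (Python) =====
-- def is_lycoris(keys, metadata):
--     """Prüft ob LoRA ein LyCORIS ist (LoHa, LoKr, LoCon, etc.)
--
--     Returns:
--         tuple: (is_lycoris, algo_type)
--     """
--
--     meta = metadata.get('__metadata__', {})
--
--     # Priority 1: Metadata Check
--     network_module = meta.get('ss_network_module', '').lower()
--
--     if 'lycoris' in network_module:
--         # Extract algo type if possible
--         if 'loha' in network_module:
--             return True, "LoHa"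
--         elif 'lokr' in network_module:
--             return True, "LoKr"
--         elif 'locon' in network_module:
--             return True, "LoCon"
--         else:
--             return True, "LyCORIS"
--
--     # Priority 2: Key Pattern Check (Fallback)
--     # LoHa (Hadamard Product)
--     if any("hada_w1" in k or "hada_w2" in k for k in keys):
--         return True, "LoHa"
--
--     # LoKr (Kronecker Product)
--     if any("lokr_w1" in k or "lokr_w2" in k for k in keys):
--         return True, "LoKr"
--
--     # LoCon (LoRA with Convolution)
--     if any("lora_mid.weight" in k for k in keys):
--         # Check if also has standard lora keys
--         if any("lora_up" in k or "lora_down" in k for k in keys):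
--             return True, "LoCon"
--
--     # Standard LoRA
--     return False, "Standard"
-- ===== SOURCE B (Python) =====
-- def is_lycoris(keys, metadata):
--     """Prüft ob LoRA ein LyCORIS ist (LoHa, LoKr, LoCon, etc.)
--
--     Returns:
--         tuple: (is_lycoris, algo_type)
--     """
--     meta = metadata.get('__metadata__', {})
--
--     # Priority 1: Metadata Check (unchanged)
--     network_module = meta.get('ss_network_module', '').lower()
--     if 'lycoris' in network_module:
--         if 'loha' in network_module:
--             return True, "LoHa"
--         elif 'lokr' in network_module:
--             return True, "LoKr"
--         elif 'locon' in network_module: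
--             return True, "LoCon"
--         else:
--             return True, "LyCORIS"
--
--     # Priority 2: one pass over the keys maintaining four flags
--     has_hada = has_lokr = has_lora_mid = has_lora_updown = False
--     for k in keys:
--         has_hada = has_hada or "hada_w1" in k or "hada_w2" in k
--         has_lokr = has_lokr or "lokr_w1" in k or "lokr_w2" in k
--         has_lora_mid = has_lora_mid or "lora_mid.weight" in k
--         has_lora_updown = has_lora_updown or "lora_up" in k or "lora_down" in k
--
--     if has_hada:
--         return True, "LoHa"
--     elif has_lokr:
--         return True, "LoKr"
--     elif has_lora_mid and has_lora_updown:
--         return True, "LoCon"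
--     return False, "Standard"
-- ===== Notes on version B (the rewrite author's own statement) =====
-- stated objective: alternative
-- what changed: The fallback's four separate any(...) scans over keys are replaced by a single pass that maintains four boolean flags, with the classification done once after the loop.
import Mathlib
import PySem

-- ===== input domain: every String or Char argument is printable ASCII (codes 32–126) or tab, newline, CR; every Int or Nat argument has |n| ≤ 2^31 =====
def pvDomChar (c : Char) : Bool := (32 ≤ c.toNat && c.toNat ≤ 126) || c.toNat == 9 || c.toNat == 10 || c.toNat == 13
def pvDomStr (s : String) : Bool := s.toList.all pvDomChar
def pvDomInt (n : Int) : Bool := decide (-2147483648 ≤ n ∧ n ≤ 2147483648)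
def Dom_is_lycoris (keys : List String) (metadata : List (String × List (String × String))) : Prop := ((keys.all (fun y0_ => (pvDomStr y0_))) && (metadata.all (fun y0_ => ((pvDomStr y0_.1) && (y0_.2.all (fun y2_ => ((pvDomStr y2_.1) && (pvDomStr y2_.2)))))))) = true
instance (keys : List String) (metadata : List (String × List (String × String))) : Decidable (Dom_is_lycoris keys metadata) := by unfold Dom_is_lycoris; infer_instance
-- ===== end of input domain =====

-- B differs from A only in structure: one pass over keys maintaining four flags instead of four any(...) scans.

-- ===== PORT A =====
def is_lycoris (keys : List String) (metadata : List (String × List (String × String))) : Bool × String :=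
  let meta_ := (metadata.lookup "__metadata__").getD []
  let network_module := PySem.Str.lower ((meta_.lookup "ss_network_module").getD "")
  if PySem.Str.isIn "lycoris" network_module then
    if PySem.Str.isIn "loha" network_module then (true, "LoHa")
    else if PySem.Str.isIn "lokr" network_module then (true, "LoKr")
    else if PySem.Str.isIn "locon" network_module then (true, "LoCon")
    else (true, "LyCORIS")
  else if keys.any (fun k => PySem.Str.isIn "hada_w1" k || PySem.Str.isIn "hada_w2" k) then
    (true, "LoHa")
  else if keys.any (fun k => PySem.Str.isIn "lokr_w1" k || PySem.Str.isIn "lokr_w2" k) then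
    (true, "LoKr")
  else if keys.any (fun k => PySem.Str.isIn "lora_mid.weight" k) then
    if keys.any (fun k => PySem.Str.isIn "lora_up" k || PySem.Str.isIn "lora_down" k) then
      (true, "LoCon")
    else (false, "Standard")
  else (false, "Standard")

-- ===== PORT B =====
-- one step of B's single pass: update the four flags from key k
def lycoStep (f : Bool × Bool × Bool × Bool) (k : String) : Bool × Bool × Bool × Bool :=
  (f.1 || PySem.Str.isIn "hada_w1" k || PySem.Str.isIn "hada_w2" k,
   f.2.1 || PySem.Str.isIn "lokr_w1" k || PySem.Str.isIn "lokr_w2" k,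
   f.2.2.1 || PySem.Str.isIn "lora_mid.weight" k,
   f.2.2.2 || PySem.Str.isIn "lora_up" k || PySem.Str.isIn "lora_down" k)

def is_lycoris_alt (keys : List String) (metadata : List (String × List (String × String))) : Bool × String :=
  let meta_ := (metadata.lookup "__metadata__").getD []
  let network_module := PySem.Str.lower ((meta_.lookup "ss_network_module").getD "")
  if PySem.Str.isIn "lycoris" network_module then
    if PySem.Str.isIn "loha" network_module then (true, "LoHa")
    else if PySem.Str.isIn "lokr" network_module then (true, "LoKr")
    else if PySem.Str.isIn "locon" network_module then (true, "LoCon")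
    else (true, "LyCORIS")
  else
    let flags := keys.foldl lycoStep (false, false, false, false)
    if flags.1 then (true, "LoHa")
    else if flags.2.1 then (true, "LoKr")
    else if flags.2.2.1 && flags.2.2.2 then (true, "LoCon")
    else (false, "Standard")

-- ===== PRECONDITION & SPEC =====
def Spec_is_lycoris (keys : List String) (metadata : List (String × List (String × String))) (out : Bool × String) : Prop := out = is_lycoris_alt keys metadata
instance (keys : List String) (metadata : List (String × List (String × String))) (out : Bool × String) : Decidable (Spec_is_lycoris keys metadata out) := by unfold Spec_is_lycoris; infer_instance

-- ===== CLAIM (what is proved, stated in full; the proofs are below) =====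
def Claim_equal_is_lycoris : Prop := ∀ (keys : List String) (metadata : List (String × List (String × String))), Dom_is_lycoris keys metadata → Spec_is_lycoris keys metadata (is_lycoris keys metadata)

-- ===== LEMMAS AND PROOFS =====

-- B's single pass computes exactly A's four any(...) scans
theorem lycoFold_eq_any (keys : List String) (f : Bool × Bool × Bool × Bool) :
    keys.foldl lycoStep f =
      (f.1 || keys.any (fun k => PySem.Str.isIn "hada_w1" k || PySem.Str.isIn "hada_w2" k),
       f.2.1 || keys.any (fun k => PySem.Str.isIn "lokr_w1" k || PySem.Str.isIn "lokr_w2" k),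
       f.2.2.1 || keys.any (fun k => PySem.Str.isIn "lora_mid.weight" k),
       f.2.2.2 || keys.any (fun k => PySem.Str.isIn "lora_up" k || PySem.Str.isIn "lora_down" k)) := by
  induction keys generalizing f with
  | nil => simp
  | cons k ks ih =>
      simp only [List.foldl_cons, ih, List.any_cons, lycoStep]
      refine Prod.ext ?_ (Prod.ext ?_ (Prod.ext ?_ ?_)) <;> simp [Bool.or_assoc]

-- ===== VERDICT (by name: the statement is the Claim_ definition above) =====
theorem is_lycoris_spec : Claim_equal_is_lycoris := by
  intro keys metadata _
  unfold Spec_is_lycoris is_lycoris is_lycoris_alt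
  simp only [lycoFold_eq_any, Bool.false_or]
  split_ifs <;> simp_all
  · rename_i hall hex
    obtain ⟨x, hx, hor⟩ := hex
    have h := hall x hx
    rcases hor with h1 | h1 <;> simp [h1] at h
  · rename_i hall hex
    obtain ⟨⟨x, hx, hm⟩, -⟩ := hex
    have h := hall x hx
    simp [hm] at h
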